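-- pv_equiv track=rewrite | github.com/gyanved124-stack/els-professional-dhruvre-77 | 7-hackersmind/iteration3.py | detect_xss_in_response
-- ===== SOURCE A (Python) =====
-- def detect_xss_in_response(response, payload):
--     """Detect if XSS payload is present in response"""
--     # Check if the payload appears unescaped
--     dangerous_patterns = [
--         "<script>",
--         "javascript:",
--         "onerror=",
--         "onload=",
--         "<iframe"
--     ]
--
--     for pattern in dangerous_patterns:
--         if pattern in response and pattern in payload:
--             return True
--
--     return False
-- ===== SOURCE B (Python) =====
-- def detect_xss_in_response(response, payload):
--     """Detect if XSS payload is present in response"""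
--     patterns = ("<script>", "javascript:", "onerror=", "onload=", "<iframe")
--
--     def found(text):
--         # single left-to-right sweep: at each position collect every pattern
--         # that starts there (hand multi-pattern matcher, no substring 'in')
--         hits = set()
--         for i in range(len(text)):
--             for p in patterns:
--                 if text.startswith(p, i):
--                     hits.add(p)
--         return hits
--
--     return not found(response).isdisjoint(found(payload))
-- ===== Notes on version B (the rewrite author's own statement) =====
-- stated objective: alternative
-- what changed: Replaced the per-pattern short-circuit loop of substring 'in' tests by a positional left-to-right sweep over each string that collects, at each index via startswith(p, i), the patterns starting there into a hit set, then answers with the disjointness of the two hit sets.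
import Mathlib
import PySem

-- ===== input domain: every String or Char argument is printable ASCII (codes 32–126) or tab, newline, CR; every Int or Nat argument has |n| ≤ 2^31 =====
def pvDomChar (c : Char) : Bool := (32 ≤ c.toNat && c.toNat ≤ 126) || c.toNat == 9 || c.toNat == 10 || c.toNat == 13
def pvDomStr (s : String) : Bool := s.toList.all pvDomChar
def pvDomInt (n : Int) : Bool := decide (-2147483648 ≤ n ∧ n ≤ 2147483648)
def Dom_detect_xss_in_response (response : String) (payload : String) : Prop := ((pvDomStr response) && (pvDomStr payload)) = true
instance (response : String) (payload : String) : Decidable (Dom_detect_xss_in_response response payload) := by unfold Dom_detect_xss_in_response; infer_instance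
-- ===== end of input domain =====

-- B replaces A's per-pattern short-circuit loop of `in` tests by a positional
-- left-to-right sweep over each string that collects, at each index, every
-- pattern starting there (hand multi-pattern matcher), then tests the two hit
-- sets for disjointness (objective: alternative structure, same cost).

-- ===== PORT A =====
-- the loop 'for pattern in dangerous_patterns: if pattern in response and pattern in payload: return True'
def pvDetectLoop (ps : List String) (response : String) (payload : String) : Bool :=
  match ps with
  | [] => false
  | p :: rest =>
    if PySem.Str.isIn p response && PySem.Str.isIn p payload then true
    else pvDetectLoop rest response payload

def detect_xss_in_response (response : String) (payload : String) : Bool :=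
  pvDetectLoop ["<script>", "javascript:", "onerror=", "onload=", "<iframe"] response payload

-- ===== PORT B =====
def pvPatterns : List (List Char) :=
  ["<script>".toList, "javascript:".toList, "onerror=".toList, "onload=".toList, "<iframe".toList]

-- 'for i in range(len(text)): for p in patterns: if text.startswith(p, i): hits.add(p)'
-- (text.startswith(p, i) for 0 ≤ i is exactly: p is a prefix of text[i:])
def pvFound (text : List Char) : PySem.Set (List Char) :=
  (List.range text.length).foldl
    (fun hits i =>
      pvPatterns.foldl
        (fun h p => if PySem.Chars.startswith (text.drop i) p then PySem.Set.add h p else h)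
        hits)
    PySem.Set.empty

def detect_xss_in_response_alt (response : String) (payload : String) : Bool :=
  !(PySem.Set.isdisjoint (pvFound response.toList) (pvFound payload.toList))

-- ===== PRECONDITION & SPEC =====
def Spec_detect_xss_in_response (response : String) (payload : String) (out : Bool) : Prop := out = detect_xss_in_response_alt response payload
instance (response : String) (payload : String) (out : Bool) : Decidable (Spec_detect_xss_in_response response payload out) := by unfold Spec_detect_xss_in_response; infer_instance

-- ===== CLAIM (what is proved, stated in full; the proofs are below) =====
def Claim_equal_detect_xss_in_response : Prop := ∀ (response : String) (payload : String), Dom_detect_xss_in_response response payload → Spec_detect_xss_in_response response payload (detect_xss_in_response response payload)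

-- ===== LEMMAS AND PROOFS =====

-- A's loop returns true iff some pattern occurs in both strings
theorem pvDetectLoop_iff (ps : List String) (r p : String) :
    pvDetectLoop ps r p = true ↔
      ∃ q ∈ ps, PySem.Str.isIn q r = true ∧ PySem.Str.isIn q p = true := by
  induction ps with
  | nil => simp [pvDetectLoop]
  | cons x rest ih =>
    simp only [pvDetectLoop]
    by_cases h : PySem.Str.isIn x r && PySem.Str.isIn x p
    · simp_all
    · rw [if_neg h, ih]
      simp only [Bool.and_eq_true] at h
      constructor
      · rintro ⟨q, hq, hqr, hqp⟩; exact ⟨q, List.mem_cons_of_mem _ hq, hqr, hqp⟩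
      · rintro ⟨q, hq, hqr, hqp⟩
        rcases List.mem_cons.1 hq with rfl | hq
        · exact absurd ⟨hqr, hqp⟩ h
        · exact ⟨q, hq, hqr, hqp⟩

-- membership after the inner conditional-add fold
theorem mem_foldl_add_if {α : Type} [BEq α] [LawfulBEq α] (l : List α) (f : α → Bool)
    (s : PySem.Set α) (y : α) :
    y ∈ l.foldl (fun h x => if f x then PySem.Set.add h x else h) s ↔
      y ∈ s ∨ (y ∈ l ∧ f y = true) := by
  induction l generalizing s with
  | nil => simp
  | cons x xs ih =>
    simp only [List.foldl_cons, ih]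
    by_cases hx : f x
    · rw [if_pos hx, PySem.Set.mem_add]
      constructor
      · rintro (⟨h | rfl⟩ | ⟨hm, hf⟩)
        · exact Or.inl h
        · exact Or.inr ⟨List.mem_cons_self .., hx⟩
        · exact Or.inr ⟨List.mem_cons_of_mem _ hm, hf⟩
      · rintro (h | ⟨hm, hf⟩)
        · exact Or.inl (Or.inl h)
        · rcases List.mem_cons.1 hm with rfl | hm
          · exact Or.inl (Or.inr rfl)
          · exact Or.inr ⟨hm, hf⟩
    · rw [if_neg hx]
      constructor
      · rintro (h | ⟨hm, hf⟩)
        · exact Or.inl h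
        · exact Or.inr ⟨List.mem_cons_of_mem _ hm, hf⟩
      · rintro (h | ⟨hm, hf⟩)
        · exact Or.inl h
        · rcases List.mem_cons.1 hm with rfl | hm
          · exact absurd hf (by simp [hx])
          · exact Or.inr ⟨hm, hf⟩

-- membership after the outer sweep over a list of positions
theorem mem_sweep (is : List Nat) (t : List Char) (s : PySem.Set (List Char)) (y : List Char) :
    y ∈ is.foldl
        (fun hits i =>
          pvPatterns.foldl
            (fun h p => if PySem.Chars.startswith (t.drop i) p then PySem.Set.add h p else h)
            hits) s ↔
      y ∈ s ∨ (y ∈ pvPatterns ∧ ∃ i ∈ is, PySem.Chars.startswith (t.drop i) y = true) := by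
  induction is generalizing s with
  | nil => simp
  | cons i rest ih =>
    simp only [List.foldl_cons, ih, mem_foldl_add_if]
    constructor
    · rintro ((h | ⟨hm, hf⟩) | ⟨hm, j, hj, hf⟩)
      · exact Or.inl h
      · exact Or.inr ⟨hm, i, List.mem_cons_self .., hf⟩
      · exact Or.inr ⟨hm, j, List.mem_cons_of_mem _ hj, hf⟩
    · rintro (h | ⟨hm, j, hj, hf⟩)
      · exact Or.inl (Or.inl h)
      · rcases List.mem_cons.1 hj with rfl | hj
        · exact Or.inl (Or.inr ⟨hm, hf⟩)
        · exact Or.inr ⟨hm, j, hj, hf⟩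

-- every pattern is nonempty
theorem pvPatterns_ne_nil (q : List Char) (hq : q ∈ pvPatterns) : q ≠ [] := by
  fin_cases hq <;> decide

-- a pattern is in pvFound t iff it occurs as a substring of t
theorem mem_pvFound (t q : List Char) :
    q ∈ pvFound t ↔ q ∈ pvPatterns ∧ PySem.Chars.isIn q t = true := by
  unfold pvFound
  rw [mem_sweep]
  simp only [PySem.Set.empty, List.not_mem_nil, false_or]
  constructor
  · rintro ⟨hm, i, _, hf⟩
    rw [PySem.Chars.startswith_iff] at hf
    exact ⟨hm, (PySem.Chars.exists_prefix_drop_iff_isIn _ _).1 ⟨i, hf⟩⟩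
  · rintro ⟨hm, hin⟩
    obtain ⟨j, hj⟩ := (PySem.Chars.exists_prefix_drop_iff_isIn _ _).2 hin
    refine ⟨hm, ?_⟩
    by_cases hlt : j < t.length
    · exact ⟨j, List.mem_range.2 hlt, (PySem.Chars.startswith_iff _ _).2 hj⟩
    · exfalso
      have : t.drop j = [] := List.drop_eq_nil_of_le (le_of_not_gt hlt)
      rw [this, List.prefix_nil] at hj
      exact pvPatterns_ne_nil q hm hj

-- B returns true iff some pattern occurs in both strings
theorem alt_iff (r p : String) :
    detect_xss_in_response_alt r p = true ↔
      ∃ q ∈ pvPatterns, PySem.Chars.isIn q r.toList = true ∧ PySem.Chars.isIn q p.toList = true := by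
  unfold detect_xss_in_response_alt
  rw [Bool.not_eq_true', ← Bool.not_eq_true, PySem.Set.isdisjoint_iff]
  push Not
  constructor
  · rintro ⟨q, hq1, hq2⟩
    rw [mem_pvFound] at hq1 hq2
    exact ⟨q, hq1.1, hq1.2, hq2.2⟩
  · rintro ⟨q, hm, hr, hp⟩
    exact ⟨q, (mem_pvFound ..).2 ⟨hm, hr⟩, (mem_pvFound ..).2 ⟨hm, hp⟩⟩

-- ===== VERDICT (by name: the statement is the Claim_ definition above) =====
theorem detect_xss_in_response_spec : Claim_equal_detect_xss_in_response := by
  intro r p _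
  unfold Spec_detect_xss_in_response detect_xss_in_response
  rw [Bool.eq_iff_iff, pvDetectLoop_iff, alt_iff]
  constructor
  · rintro ⟨q, hq, hr, hp⟩
    refine ⟨q.toList, ?_, ?_, ?_⟩
    · fin_cases hq <;> simp [pvPatterns]
    · simpa using hr
    · simpa using hp
  · rintro ⟨q, hq, hr, hp⟩
    fin_cases hq
    · exact ⟨"<script>", by simp, by simpa using hr, by simpa using hp⟩
    · exact ⟨"javascript:", by simp, by simpa using hr, by simpa using hp⟩
    · exact ⟨"onerror=", by simp, by simpa using hr, by simpa using hp⟩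
    · exact ⟨"onload=", by simp, by simpa using hr, by simpa using hp⟩
    · exact ⟨"<iframe", by simp, by simpa using hr, by simpa using hp⟩
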